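-- pv_equiv track=rewrite | github.com/stephanie0324/UNI_NTU | 2020/Operation_Research/Case 1/Code/find min/prerequisite.py | pre_output
-- ===== SOURCE A (Python) =====
-- def pre_output(days):
--     """
--         table: { id: [shifts], ...,  }, -1
--     """
--     table = {}
--     id = [12, 19, 20, 23, 30, 36, 37, 40, 45, 49, 69, 70, 72, 73, 74, 75, 84,
--           90, 98, 118, 120, 121, 122, 129, 132, 136, 144, 158, 170, 171, 172,
--           186, 190, 203, 208, 213, 231, 239, 241, 249 ]
--
--     for emp in id:
--         table[emp] = []
--         for day in range(days + 1):
--             # Leave Limit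
--             if emp == 12 and day == 3:            # 3/3
--                 table[emp].append(0)
--             elif emp == 19 and day in [1, 2, 3]:  # 3/1 ~ 3/3
--                 table[emp].append(0)
--             elif emp == 23 and day == 31:         # 3/31
--                 table[emp].append(0)
--             elif emp == 90 and day == 20:         # 3/20
--                 table[emp].append(0)
--             elif emp == 98 and day in [19, 20]:   # 3/19 ~ 3/20
--                 table[emp].append(0)
--             elif emp == 118 and day == 15:        # 3/15
--                 table[emp].append(0)
--             elif emp == 231 and day == 14:        # 3/14
--                 table[emp].append(0)
--             # Shift Limit
--             elif emp == 144 and day == 10:         # 3/10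
--                 table[emp].append(5)
--             elif emp == 98 and day == 17:         # 3/17
--                 table[emp].append(6)
--             elif emp == 70 and day == 27:         # 3/27
--                 table[emp].append(13)
--             else:
--                 table[emp].append(-1)
--
--     return table
-- ===== SOURCE B (Python) =====
-- EXC = {
--     12: [(3, 0)],
--     19: [(1, 0), (2, 0), (3, 0)],
--     23: [(31, 0)],
--     90: [(20, 0)],
--     98: [(19, 0), (20, 0), (17, 6)],
--     118: [(15, 0)],
--     231: [(14, 0)],
--     144: [(10, 5)],
--     70: [(27, 13)],
-- }
--
-- def pre_output(days):
--     ids = [12, 19, 20, 23, 30, 36, 37, 40, 45, 49, 69, 70, 72, 73, 74, 75, 84,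
--            90, 98, 118, 120, 121, 122, 129, 132, 136, 144, 158, 170, 171, 172,
--            186, 190, 203, 208, 213, 231, 239, 241, 249]
--     table = {}
--     for emp in ids:
--         row = [-1] * (days + 1)
--         for day, val in EXC.get(emp, []):
--             if 0 <= day <= days:
--                 row[day] = val
--         table[emp] = row
--     return table
-- ===== Notes on version B (the rewrite author's own statement) =====
-- stated objective: simpler
-- what changed: Instead of deciding every (emp, day) cell with a nested per-day if/elif chain, B builds a default [-1]*(days+1) row once and patches only the few exceptional cells from a precomputed exceptions table keyed by employee.
import Mathlib
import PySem

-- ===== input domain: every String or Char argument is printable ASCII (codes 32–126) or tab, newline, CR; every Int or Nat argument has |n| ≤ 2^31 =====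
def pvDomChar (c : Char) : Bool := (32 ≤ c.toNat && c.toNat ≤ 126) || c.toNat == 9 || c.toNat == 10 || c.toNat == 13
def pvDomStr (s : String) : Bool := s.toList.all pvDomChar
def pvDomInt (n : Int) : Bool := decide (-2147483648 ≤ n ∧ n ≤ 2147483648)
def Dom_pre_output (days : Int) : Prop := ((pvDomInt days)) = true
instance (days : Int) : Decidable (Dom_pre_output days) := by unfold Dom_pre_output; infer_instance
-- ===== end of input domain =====

-- B builds a default [-1] row and patches the few exceptional cells from an exceptions
-- table, instead of A's nested per-day if/elif chain; objective: simpler.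

-- ===== PORT A =====
def pvIdsA : List Int := [12, 19, 20, 23, 30, 36, 37, 40, 45, 49, 69, 70, 72, 73, 74, 75, 84,
  90, 98, 118, 120, 121, 122, 129, 132, 136, 144, 158, 170, 171, 172,
  186, 190, 203, 208, 213, 231, 239, 241, 249]

-- the if/elif chain of A's inner loop body, branches in the same order
def pvCellA (emp day : Int) : Int :=
  if emp = 12 ∧ day = 3 then 0
  else if emp = 19 ∧ (day = 1 ∨ day = 2 ∨ day = 3) then 0
  else if emp = 23 ∧ day = 31 then 0
  else if emp = 90 ∧ day = 20 then 0
  else if emp = 98 ∧ (day = 19 ∨ day = 20) then 0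
  else if emp = 118 ∧ day = 15 then 0
  else if emp = 231 ∧ day = 14 then 0
  else if emp = 144 ∧ day = 10 then 5
  else if emp = 98 ∧ day = 17 then 6
  else if emp = 70 ∧ day = 27 then 13
  else -1

def pvRowA (days emp : Int) : List Int :=
  (PySem.List.pyRange 0 (days + 1) 1).foldl (fun r day => r ++ [pvCellA emp day]) []

def pre_output (days : Int) : List (Int × List Int) :=
  (pvIdsA.foldl (fun (t : PySem.Dict Int (List Int)) emp => t.insert emp (pvRowA days emp))
    PySem.Dict.empty).items

-- ===== PORT B =====
def pvIdsB : List Int := [12, 19, 20, 23, 30, 36, 37, 40, 45, 49, 69, 70, 72, 73, 74, 75, 84,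
  90, 98, 118, 120, 121, 122, 129, 132, 136, 144, 158, 170, 171, 172,
  186, 190, 203, 208, 213, 231, 239, 241, 249]

-- EXC.get(emp, []) of Source B
def pvExc (emp : Int) : List (Int × Int) :=
  if emp = 12 then [(3, 0)]
  else if emp = 19 then [(1, 0), (2, 0), (3, 0)]
  else if emp = 23 then [(31, 0)]
  else if emp = 90 then [(20, 0)]
  else if emp = 98 then [(19, 0), (20, 0), (17, 6)]
  else if emp = 118 then [(15, 0)]
  else if emp = 231 then [(14, 0)]
  else if emp = 144 then [(10, 5)]
  else if emp = 70 then [(27, 13)]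
  else []

def pvPatch (days : Int) (row : List Int) (p : Int × Int) : List Int :=
  if 0 ≤ p.1 ∧ p.1 ≤ days then row.set p.1.toNat p.2 else row

def pvRowB (days emp : Int) : List Int :=
  (pvExc emp).foldl (pvPatch days) (List.replicate (days + 1).toNat (-1))

def pre_output_alt (days : Int) : List (Int × List Int) :=
  pvIdsB.foldl (fun t emp => t ++ [(emp, pvRowB days emp)]) []

-- ===== PRECONDITION & SPEC =====
def Spec_pre_output (days : Int) (out : List (Int × List Int)) : Prop := out = pre_output_alt days
instance (days : Int) (out : List (Int × List Int)) : Decidable (Spec_pre_output days out) := by unfold Spec_pre_output; infer_instance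

-- ===== CLAIM (what is proved, stated in full; the proofs are below) =====
def Claim_equal_pre_output : Prop := ∀ (days : Int), Dom_pre_output days → Spec_pre_output days (pre_output days)

-- ===== LEMMAS AND PROOFS =====

theorem pv_foldl_app {α β : Type} (f : β → α) (l : List β) (acc : List α) :
    l.foldl (fun r b => r ++ [f b]) acc = acc ++ l.map f := by
  induction l generalizing acc with
  | nil => simp
  | cons b t ih => simp [List.foldl, ih]

theorem pvRowA_eq_map (days emp : Int) :
    pvRowA days emp = (List.range (days + 1).toNat).map (fun (k : Nat) => pvCellA emp (k : Int)) := by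
  unfold pvRowA
  rw [PySem.List.pyRange_one, pv_foldl_app]
  simp only [List.nil_append, List.map_map, Function.comp_def, Int.sub_zero, zero_add]

theorem pv_len_foldl_patch (days : Int) (ps : List (Int × Int)) (row : List Int) :
    (ps.foldl (pvPatch days) row).length = row.length := by
  induction ps generalizing row with
  | nil => rfl
  | cons p t ih =>
    rw [List.foldl_cons, ih]
    unfold pvPatch; split <;> simp

theorem pv_find_cons (days : Int) (i : Nat) (p : Int × Int) (ps : List (Int × Int)) :
    (p :: ps).find? (fun q => q.1 == (i : Int) && decide (q.1 ≤ days)) =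
      if p.1 = (i : Int) ∧ p.1 ≤ days then some p
      else ps.find? (fun q => q.1 == (i : Int) && decide (q.1 ≤ days)) := by
  rw [List.find?_cons]
  by_cases h : p.1 = (i : Int) ∧ p.1 ≤ days
  · have hb : (p.1 == (i : Int) && decide (p.1 ≤ days)) = true := by
      simp only [Bool.and_eq_true, beq_iff_eq, decide_eq_true_eq]; exact h
    rw [hb, if_pos h]
  · have hb : (p.1 == (i : Int) && decide (p.1 ≤ days)) = false := by
      simp only [Bool.and_eq_false_iff, beq_eq_false_iff_ne, decide_eq_false_iff_not]
      exact not_and_or.mp h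
    rw [hb, if_neg h]

theorem pv_getElem?_foldl_patch (days : Int) (ps : List (Int × Int))
    (hnd : ps.Pairwise (fun a b => a.1 ≠ b.1)) (row : List Int) (i : Nat) (hi : i < row.length) :
    (ps.foldl (pvPatch days) row)[i]? =
      (match ps.find? (fun p => p.1 == (i : Int) && decide (p.1 ≤ days)) with
       | some p => some p.2
       | none => row[i]?) := by
  induction ps generalizing row with
  | nil => rfl
  | cons p t ih =>
    have hlen : i < (pvPatch days row p).length := by
      unfold pvPatch; split <;> simpa
    rw [List.foldl_cons, ih (List.Pairwise.of_cons hnd) _ hlen, List.find?_cons]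
    by_cases hc : (p.1 == (i : Int) && decide (p.1 ≤ days)) = true
    · rw [hc]
      have hfind : t.find? (fun q => q.1 == (i : Int) && decide (q.1 ≤ days)) = none := by
        rw [List.find?_eq_none]
        intro q hq
        have hne : p.1 ≠ q.1 := (List.pairwise_cons.mp hnd).1 q hq
        simp only [Bool.and_eq_true, beq_iff_eq, decide_eq_true_eq] at hc ⊢
        rintro ⟨hq1, -⟩; exact hne (hc.1.trans hq1.symm)
      rw [hfind]
      simp only [Bool.and_eq_true, beq_iff_eq, decide_eq_true_eq] at hc
      have hguard : 0 ≤ p.1 ∧ p.1 ≤ days := ⟨hc.1 ▸ Int.natCast_nonneg i, hc.2⟩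
      have htn : p.1.toNat = i := by omega
      simp [pvPatch, hguard, htn, hi]
    · rw [Bool.not_eq_true] at hc
      rw [hc]
      have hrow : (pvPatch days row p)[i]? = row[i]? := by
        unfold pvPatch
        split
        · rename_i hg
          have hne : p.1.toNat ≠ i := by
            simp only [Bool.and_eq_false_iff, beq_eq_false_iff_ne,
              decide_eq_false_iff_not] at hc
            omega
          rw [List.getElem?_set_ne hne]
        · rfl
      rw [hrow]

set_option maxHeartbeats 4000000 in
theorem pvRow_eq (days emp : Int) : pvRowA days emp = pvRowB days emp := by
  rw [pvRowA_eq_map]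
  unfold pvRowB
  have hnd : (pvExc emp).Pairwise (fun a b => a.1 ≠ b.1) := by
    unfold pvExc; split_ifs <;> decide
  apply List.ext_getElem?
  intro i
  by_cases hi : i < (days + 1).toNat
  · have hi' : i < (List.replicate (days + 1).toNat (-1 : Int)).length := by simpa using hi
    rw [pv_getElem?_foldl_patch days _ hnd _ i hi',
      List.getElem?_map, List.getElem?_range hi]
    simp only [Option.map_some]
    have hday : (i : Int) ≤ days := by omega
    have hcase : emp = 12 ∨ emp = 19 ∨ emp = 23 ∨ emp = 90 ∨ emp = 98 ∨ emp = 118 ∨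
        emp = 231 ∨ emp = 144 ∨ emp = 70 ∨
        (emp ≠ 12 ∧ emp ≠ 19 ∧ emp ≠ 23 ∧ emp ≠ 90 ∧ emp ≠ 98 ∧ emp ≠ 118 ∧ emp ≠ 231 ∧
          emp ≠ 144 ∧ emp ≠ 70) := by omega
    rcases hcase with h | h | h | h | h | h | h | h | h | h
    all_goals first
      | (subst h
         simp only [pvExc, Int.reduceEq, reduceIte]
         simp only [pv_find_cons, List.find?_nil, pvCellA, true_and]
         split_ifs <;>
           first
             | rfl
             | (exfalso; omega)
             | (rw [List.getElem?_eq_getElem hi']; simp))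
      | (obtain ⟨h1, h2, h3, h4, h5, h6, h7, h8, h9⟩ := h
         simp only [pvExc, if_neg h1, if_neg h2, if_neg h3, if_neg h4, if_neg h5,
           if_neg h6, if_neg h7, if_neg h8, if_neg h9, List.find?_nil, pvCellA]
         split_ifs <;>
           first
             | (exfalso; omega)
             | (rw [List.getElem?_eq_getElem hi']; simp))
  · rw [List.getElem?_eq_none (by simp only [List.length_map, List.length_range]; omega),
      List.getElem?_eq_none (by rw [pv_len_foldl_patch]; simp only [List.length_replicate]; omega)]

-- ===== VERDICT (by name: the statement is the Claim_ definition above) =====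
theorem pre_output_spec : Claim_equal_pre_output := by
  intro days _
  unfold Spec_pre_output pre_output pre_output_alt
  have hA := PySem.Dict.items_foldl_insert_fresh
      (d := (PySem.Dict.empty : PySem.Dict Int (List Int))) (l := pvIdsA)
      (k := fun a => a) (v := fun emp => pvRowA days emp)
      (by intro a _; rfl) (by decide)
  simp only at hA
  rw [hA, pv_foldl_app (f := fun emp => (emp, pvRowB days emp))]
  simp only [PySem.Dict.empty, List.nil_append]
  have hids : pvIdsA = pvIdsB := by decide
  rw [hids]
  exact List.map_congr_left fun emp _ => by rw [pvRow_eq]
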